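-- pv_equiv track=rewrite | github.com/joestalker1/leetcode | src/main/scala/FacebookHackerCup/2021/Round1/WeakTypingChapter2.py | calc_for_all_subseq
-- ===== SOURCE A (Python) =====
-- def calc_for_all_subseq(w):
--     if len(w) <= 1:
--         return 0
--     times = 0
--     for l in range(2, len(w)+1):
--         for i in range(len(w) - l + 1):
--             j = i + l
--             sub = w[i:j]
--             t = calc_switch_times_for_one_string(sub)
--             times += t
--     return times
--
-- def calc_switch_times_for_one_string(w):
--     if len(w) <= 1:
--         return 0
--     lh = ['F', 'X']
--     rh = ['F','O']
--     hand = None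
--     times = 0
--     i = 0
--     while i < len(w):
--         if w[i] == 'X':
--             hand = lh
--             break
--         elif w[i] == 'O':
--             hand = rh
--             break
--         i += 1
--
--     while i < len(w):
--         if w[i] not in hand:
--             hand = lh
--             if w[i] in rh:
--                 hand = rh
--             times += 1
--         i += 1
--     return times
-- ===== SOURCE B (Python) =====
-- def _step(hand_t, c):
--     hand, t = hand_t
--     if hand is None:
--         if c == 'X':
--             return ('L', t)
--         if c == 'O':
--             return ('R', t)
--         return (None, t)
--     if c == 'F':
--         return (hand, t)
--     if c == 'X':
--         return ('L', t + 1) if hand == 'R' else ('L', t)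
--     if c == 'O':
--         return ('R', t + 1) if hand == 'L' else ('R', t)
--     return ('L', t + 1)
--
--
-- def calc_for_all_subseq(w):
--     # One incremental state-machine sweep per start index: O(n^2) instead of
--     # re-scanning every substring (O(n^3)).
--     total = 0
--     chars = list(w)
--     for i, c in enumerate(chars):
--         st = _step((None, 0), c)
--         for d in chars[i + 1:]:
--             st = _step(st, d)
--             total += st[1]
--     return total
-- ===== Notes on version B (the rewrite author's own statement) =====
-- stated objective: faster
-- what changed: Replaces the triple loop that re-scans every substring with its own helper pass by a single incremental state machine run once from each start index, accumulating the switch count of each extension in O(1).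
import Mathlib
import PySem

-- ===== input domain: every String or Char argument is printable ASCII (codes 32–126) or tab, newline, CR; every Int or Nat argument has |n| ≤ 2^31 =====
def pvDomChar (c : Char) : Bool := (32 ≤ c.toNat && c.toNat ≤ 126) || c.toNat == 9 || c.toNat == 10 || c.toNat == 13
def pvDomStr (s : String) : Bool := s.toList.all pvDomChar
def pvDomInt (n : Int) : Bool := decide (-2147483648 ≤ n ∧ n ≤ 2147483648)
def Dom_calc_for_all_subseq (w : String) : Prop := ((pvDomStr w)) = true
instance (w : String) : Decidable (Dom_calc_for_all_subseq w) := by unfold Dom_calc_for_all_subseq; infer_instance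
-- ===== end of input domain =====

-- B replaces A's triple loop (helper re-scan of every substring) by one incremental
-- state-machine sweep per start index: O(n^2) instead of O(n^3) (objective: faster).


-- ===== PORT A =====
-- first while loop of calc_switch_times_for_one_string: scan for the first 'X'/'O',
-- returning the hand it selects and the remaining suffix starting at that char
def pvFirstWhile : List Char → Option (List Char) × List Char
  | [] => (none, [])
  | c :: rest =>
    if c = 'X' then (some ['F', 'X'], c :: rest)
    else if c = 'O' then (some ['F', 'O'], c :: rest)
    else pvFirstWhile rest

-- second while loop: membership tests against the hand list, counting switches
def pvSecondWhile : List Char → List Char → Int → Int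
  | _, [], times => times
  | hand, c :: rest, times =>
    if c ∉ hand then
      let hand1 := ['F', 'X']
      let hand2 := if c ∈ ['F', 'O'] then ['F', 'O'] else hand1
      pvSecondWhile hand2 rest (times + 1)
    else pvSecondWhile hand rest times

def calc_switch_times_for_one_string (v : List Char) : Int :=
  if v.length ≤ 1 then 0
  else
    match pvFirstWhile v with
    | (none, _) => 0
    | (some hand, rest) => pvSecondWhile hand rest 0

def calc_for_all_subseq (w : String) : Int :=
  if w.toList.length ≤ 1 then 0
  else
    (PySem.List.pyRange 2 ((w.toList.length : Int) + 1) 1).foldl (fun times len =>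
      (PySem.List.pyRange 0 ((w.toList.length : Int) - len + 1) 1).foldl (fun times i =>
        times + calc_switch_times_for_one_string
          (PySem.List.slice w.toList (some i) (some (i + len)))) times) 0

-- ===== PORT B =====
-- one step of the switch-count state machine (port of Source B's _step)
def pvStep (s : Option Char × Int) (c : Char) : Option Char × Int :=
  match s with
  | (none, t) =>
    if c = 'X' then (some 'L', t)
    else if c = 'O' then (some 'R', t)
    else (none, t)
  | (some h, t) =>
    if c = 'F' then (some h, t)
    else if c = 'X' then (if h = 'R' then (some 'L', t + 1) else (some 'L', t))
    else if c = 'O' then (if h = 'L' then (some 'R', t + 1) else (some 'R', t))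
    else (some 'L', t + 1)

-- inner loop: extend the current start's substring one char at a time, adding the count
def pvInner : Option Char × Int → Int → List Char → Int
  | _, total, [] => total
  | s, total, c :: rest =>
    let s' := pvStep s c
    pvInner s' (total + s'.2) rest

-- outer loop: one sweep per start index (the suffix c :: rest is chars[i:])
def pvOuter : List Char → Int → Int
  | [], total => total
  | c :: rest, total => pvOuter rest (pvInner (pvStep (none, 0) c) total rest)

def calc_for_all_subseq_alt (w : String) : Int := pvOuter w.toList 0

-- ===== PRECONDITION & SPEC =====
def Spec_calc_for_all_subseq (w : String) (out : Int) : Prop := out = calc_for_all_subseq_alt w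
instance (w : String) (out : Int) : Decidable (Spec_calc_for_all_subseq w out) := by unfold Spec_calc_for_all_subseq; infer_instance

-- ===== CLAIM (what is proved, stated in full; the proofs are below) =====
def Claim_equal_calc_for_all_subseq : Prop := ∀ (w : String), Dom_calc_for_all_subseq w → Spec_calc_for_all_subseq w (calc_for_all_subseq w)

-- ===== LEMMAS AND PROOFS =====

-- switch count of a whole list under the state machine
def pvSwc (v : List Char) : Int := (v.foldl pvStep (none, 0)).2

-- the count component of the machine is a shift: state is independent of t, count adds t
theorem pvStep_shift (s : Option Char) (t : Int) (c : Char) :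
    pvStep (s, t) c = ((pvStep (s, 0) c).1, t + (pvStep (s, 0) c).2) := by
  cases s <;> simp [pvStep] <;> split_ifs <;> simp

theorem pvFoldl_shift (v : List Char) (s : Option Char) (t : Int) :
    v.foldl pvStep (s, t) = ((v.foldl pvStep (s, 0)).1, t + (v.foldl pvStep (s, 0)).2) := by
  induction v generalizing s t with
  | nil => simp
  | cons c rest ih =>
    simp only [List.foldl_cons]
    rw [pvStep_shift, ih, ih (pvStep (s, 0) c).1 (pvStep (s, 0) c).2]
    simp [Prod.ext_iff]; ring

theorem pvFoldl_snd_shift (v : List Char) (s : Option Char) (t : Int) :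
    (v.foldl pvStep (s, t)).2 = t + (v.foldl pvStep (s, 0)).2 := by rw [pvFoldl_shift]

-- A's second while loop is the machine run from an initialized hand
theorem pvSecond_eq_machine (rest : List Char) (b : Bool) (times : Int) :
    pvSecondWhile (if b then ['F', 'X'] else ['F', 'O']) rest times
      = times + (rest.foldl pvStep (some (if b then 'L' else 'R'), 0)).2 := by
  induction rest generalizing b times with
  | nil => cases b <;> simp [pvSecondWhile]
  | cons c rest ih =>
    have ihT : ∀ t, pvSecondWhile ['F', 'X'] rest t = t + (rest.foldl pvStep (some 'L', 0)).2 :=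
      fun t => by simpa using ih true t
    have ihF : ∀ t, pvSecondWhile ['F', 'O'] rest t = t + (rest.foldl pvStep (some 'R', 0)).2 :=
      fun t => by simpa using ih false t
    have sh1 : ∀ s : Option Char, (rest.foldl pvStep (s, (1 : Int))).2
        = 1 + (rest.foldl pvStep (s, 0)).2 := fun s => pvFoldl_snd_shift rest s 1
    by_cases hF : c = 'F'
    · subst hF; cases b <;> simp [pvSecondWhile, pvStep, ihT, ihF]
    · by_cases hX : c = 'X'
      · subst hX; cases b <;> simp [pvSecondWhile, pvStep, ihT, sh1] <;> ring
      · by_cases hO : c = 'O'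
        · subst hO; cases b <;> simp [pvSecondWhile, pvStep, ihF, sh1] <;> ring
        · cases b <;> simp [pvSecondWhile, pvStep, hF, hX, hO, ihT, sh1] <;> ring

-- matching on the first-while result equals running the machine from scratch
theorem pvFw_match (v : List Char) :
    (match pvFirstWhile v with
     | (none, _) => (0 : Int)
     | (some hand, rest) => pvSecondWhile hand rest 0) = pvSwc v := by
  induction v with
  | nil => simp [pvFirstWhile, pvSwc]
  | cons c rest ih =>
    by_cases hX : c = 'X'
    · subst hX
      simp [pvFirstWhile, pvSecondWhile, pvSwc, pvStep]
      simpa using pvSecond_eq_machine rest true 0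
    · by_cases hO : c = 'O'
      · subst hO
        simp [pvFirstWhile, pvSecondWhile, pvSwc, pvStep]
        simpa using pvSecond_eq_machine rest false 0
      · simpa [pvFirstWhile, hX, hO, pvSwc, pvStep] using ih

-- A's helper equals the machine count
theorem pvHelper_eq_swc (v : List Char) : calc_switch_times_for_one_string v = pvSwc v := by
  unfold calc_switch_times_for_one_string
  split_ifs with h
  · match v, h with
    | [], _ => simp [pvSwc]
    | [c], _ => simp [pvSwc, pvStep]; split_ifs <;> rfl
    | c :: d :: t, h => simp at h
  · exact pvFw_match v

-- B's inner loop sums the machine count of every nonempty prefix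
theorem pvInner_sum (v : List Char) (s : Option Char × Int) (total : Int) :
    pvInner s total v
      = total + ∑ k ∈ Finset.range v.length, ((v.take (k + 1)).foldl pvStep s).2 := by
  induction v generalizing s total with
  | nil => simp [pvInner]
  | cons c rest ih =>
    simp only [pvInner, List.length_cons]
    rw [ih, Finset.sum_range_succ']
    simp only [List.take_succ_cons, List.foldl_cons]
    simp only [List.take_zero, List.foldl_nil]
    ring

-- B's outer loop sums the machine count over all substrings of length ≥ 2
theorem pvOuter_sum (l : List Char) (total : Int) :
    pvOuter l total
      = total + ∑ i ∈ Finset.range l.length,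
          ∑ k ∈ Finset.range (l.length - 1 - i), pvSwc ((l.drop i).take (k + 2)) := by
  induction l generalizing total with
  | nil => simp [pvOuter]
  | cons c rest ih =>
    simp only [pvOuter, List.length_cons]
    rw [ih, pvInner_sum, Finset.sum_range_succ']
    simp only [List.drop_succ_cons, List.drop_zero, List.take_succ_cons]
    have h1 : ∑ k ∈ Finset.range rest.length, ((rest.take (k + 1)).foldl pvStep (pvStep (none, 0) c)).2
        = ∑ k ∈ Finset.range (rest.length + 1 - 1 - 0), pvSwc (c :: rest.take (k + 1)) := by
      simp only [Nat.sub_zero, Nat.add_sub_cancel]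
      exact Finset.sum_congr rfl fun k _ => rfl
    have h2 : ∑ i ∈ Finset.range rest.length,
          ∑ k ∈ Finset.range (rest.length - 1 - i), pvSwc ((rest.drop i).take (k + 2))
        = ∑ i ∈ Finset.range rest.length,
          ∑ k ∈ Finset.range (rest.length + 1 - 1 - (i + 1)), pvSwc ((rest.drop i).take (k + 2)) := by
      refine Finset.sum_congr rfl fun i _ => ?_
      rw [show rest.length + 1 - 1 - (i + 1) = rest.length - 1 - i from by omega]
    rw [h1, h2]
    ring

-- range extension with a guard
theorem pvSum_ext (m M : Nat) (h : m ≤ M) (f : Nat → Int) :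
    ∑ j ∈ Finset.range m, f j = ∑ j ∈ Finset.range M, if j < m then f j else 0 := by
  rw [← Finset.sum_filter]
  congr 1
  ext j
  simp [Finset.mem_filter]
  omega

-- exchanging A's (length, start) summation order for B's (start, end) order
theorem pvSum_swap (n : Nat) (G : Nat → Nat → Int) :
    ∑ u ∈ Finset.range (n - 1), ∑ i ∈ Finset.range (n - 1 - u), G i (u + 2)
      = ∑ i ∈ Finset.range n, ∑ k ∈ Finset.range (n - 1 - i), G i (k + 2) := by
  have hL : ∑ u ∈ Finset.range (n - 1), ∑ i ∈ Finset.range (n - 1 - u), G i (u + 2)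
      = ∑ u ∈ Finset.range n, ∑ i ∈ Finset.range n, if i < n - 1 - u then G i (u + 2) else 0 := by
    rw [pvSum_ext (n - 1) n (by omega)]
    refine Finset.sum_congr rfl fun u _ => ?_
    by_cases h : u < n - 1
    · rw [if_pos h, pvSum_ext (n - 1 - u) n (by omega)]
    · rw [if_neg h]
      exact (Finset.sum_eq_zero fun i _ => if_neg (by omega)).symm
  have hR : ∑ i ∈ Finset.range n, ∑ k ∈ Finset.range (n - 1 - i), G i (k + 2)
      = ∑ i ∈ Finset.range n, ∑ u ∈ Finset.range n, if u < n - 1 - i then G i (u + 2) else 0 := by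
    refine Finset.sum_congr rfl fun i _ => ?_
    exact pvSum_ext (n - 1 - i) n (by omega) _
  rw [hL, hR, Finset.sum_comm]
  refine Finset.sum_congr rfl fun i _ => Finset.sum_congr rfl fun u _ => ?_
  by_cases hc : i < n - 1 - u
  · rw [if_pos hc, if_pos (by omega)]
  · rw [if_neg hc, if_neg (by omega)]

-- sum over List.range equals the Finset.range sum
theorem pvSum_range (n : Nat) (f : Nat → Int) :
    ((List.range n).map f).sum = ∑ i ∈ Finset.range n, f i := rfl

-- ===== VERDICT (by name: the statement is the Claim_ definition above) =====
theorem calc_for_all_subseq_spec : Claim_equal_calc_for_all_subseq := by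
  intro w _
  unfold Spec_calc_for_all_subseq calc_for_all_subseq calc_for_all_subseq_alt
  generalize w.toList = l
  rw [pvOuter_sum l 0]
  by_cases h : l.length ≤ 1
  · rw [if_pos h]
    rw [Finset.sum_eq_zero fun i _ => by
      rw [show l.length - 1 - i = 0 from by omega]; simp]
    simp
  · rw [if_neg h]
    simp only [PySem.List.foldl_add, PySem.List.pyRange_one, List.map_map,
      pvHelper_eq_swc]
    simp only [pvSum_range, Function.comp_def]
    rw [show (((l.length : Int) + 1 - 2).toNat) = l.length - 1 from by omega]
    have hs := pvSum_swap l.length (fun i m => pvSwc ((l.drop i).take m))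
    simp only [] at hs
    rw [← hs]
    refine congrArg (0 + ·) ?_
    refine Finset.sum_congr rfl fun u hu => ?_
    simp only [Finset.mem_range] at hu
    rw [show (((l.length : Int) - (2 + (u : Nat)) + 1 - 0).toNat) = l.length - 1 - u from by omega]
    refine Finset.sum_congr rfl fun i hi => ?_
    simp only [Finset.mem_range] at hi
    rw [show ((0 : Int) + (i : Nat)) = ((i : Nat) : Int) from by ring]
    rw [show ((i : Nat) : Int) + (2 + (u : Nat)) = (((i + (2 + u) : Nat)) : Int) from by push_cast; ring]
    rw [PySem.List.slice_natCast]
    rw [show i + (2 + u) - i = u + 2 from by omega]
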